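-- pv_equiv track=rewrite | github.com/rebuilt32-bit/btc-signal | disagreement_test.py | select_phase_predictions
-- ===== SOURCE A (Python) =====
-- PHASE_CHECKPOINTS = [
--     {"label": "early", "target_seconds": 600, "min": 360, "max": 900},   # ~10 min, range 6-15 min
--     {"label": "mid", "target_seconds": 180, "min": 90, "max": 360},      # ~3 min, range 1.5-6 min
--     {"label": "final_minute", "target_seconds": 30, "min": 0, "max": 90},  # ~30s, range 0-90s
-- ]
--
-- def select_phase_predictions(predictions_by_ticker):
--     """
--     For each ticker, pick at most one prediction per phase.
--     Returns a list of (ticker, phase_label, prediction) tuples.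
--     """
--     selected = []
--     for ticker, preds in predictions_by_ticker.items():
--         for phase in PHASE_CHECKPOINTS:
--             # Find predictions in this phase's seconds_left range
--             in_phase = [
--                 p for p in preds
--                 if p.get("seconds_left") is not None
--                 and phase["min"] <= p["seconds_left"] <= phase["max"]
--             ]
--             if not in_phase:
--                 continue
--             # Pick the one closest to target
--             best = min(in_phase, key=lambda p: abs(p["seconds_left"] - phase["target_seconds"]))
--             selected.append((ticker, phase["label"], best))
--     return selected
-- ===== SOURCE B (Python) =====
-- PHASE_CHECKPOINTS = [
--     {"label": "early", "target_seconds": 600, "min": 360, "max": 900},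
--     {"label": "mid", "target_seconds": 180, "min": 90, "max": 360},
--     {"label": "final_minute", "target_seconds": 30, "min": 0, "max": 90},
-- ]
--
-- def select_phase_predictions(predictions_by_ticker):
--     """
--     For each ticker, pick at most one prediction per phase.
--     Returns a list of (ticker, phase_label, prediction) tuples.
--     One pass over each ticker's predictions, keeping per-phase running bests.
--     """
--     selected = []
--     for ticker, preds in predictions_by_ticker.items():
--         best = [None] * len(PHASE_CHECKPOINTS)
--         for p in preds:
--             s = p.get("seconds_left")
--             if s is None:
--                 continue
--             for i, ph in enumerate(PHASE_CHECKPOINTS):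
--                 if ph["min"] <= s <= ph["max"]:
--                     d = abs(s - ph["target_seconds"])
--                     if best[i] is None or d < best[i][1]:
--                         best[i] = (p, d)
--         for ph, b in zip(PHASE_CHECKPOINTS, best):
--             if b is not None:
--                 selected.append((ticker, ph["label"], b[0]))
--     return selected
-- ===== Notes on version B (the rewrite author's own statement) =====
-- stated objective: alternative
-- what changed: Replaces the per-phase filter-then-min scans (three passes over each ticker's predictions) with a single pass per ticker that maintains a running best (prediction, distance) accumulator for each phase, updating on strictly smaller distance and emitting phases in fixed order afterwards.
import Mathlib
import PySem

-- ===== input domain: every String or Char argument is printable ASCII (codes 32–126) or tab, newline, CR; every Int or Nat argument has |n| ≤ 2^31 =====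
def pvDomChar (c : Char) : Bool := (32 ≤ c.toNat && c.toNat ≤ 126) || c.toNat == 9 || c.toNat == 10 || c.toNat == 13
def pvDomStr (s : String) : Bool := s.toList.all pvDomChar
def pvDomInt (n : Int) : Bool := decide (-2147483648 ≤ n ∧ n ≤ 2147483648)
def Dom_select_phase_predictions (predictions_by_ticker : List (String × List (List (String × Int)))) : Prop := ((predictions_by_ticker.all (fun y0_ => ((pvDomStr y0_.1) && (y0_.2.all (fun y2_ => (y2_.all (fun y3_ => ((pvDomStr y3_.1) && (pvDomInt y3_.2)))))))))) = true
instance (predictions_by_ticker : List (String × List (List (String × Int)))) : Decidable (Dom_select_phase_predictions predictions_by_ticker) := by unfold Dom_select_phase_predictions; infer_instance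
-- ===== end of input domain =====

-- B replaces A's three filter-then-min scans per ticker with a single pass keeping a running best per phase (alternative decomposition, same result).


-- ===== PORT A =====
-- PHASE_CHECKPOINTS: (label, target_seconds, min, max)
def pvPhases : List (String × Int × Int × Int) :=
  [("early", 600, 360, 900), ("mid", 180, 90, 360), ("final_minute", 30, 0, 90)]

-- p.get("seconds_left")  (dict lookup, first match)
def pvGetSL (p : List (String × Int)) : Option Int := (PySem.Dict.mk p).get? "seconds_left"

-- the phase-membership test of A's list comprehension
def pvInPh (ph : String × Int × Int × Int) (p : List (String × Int)) : Bool :=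
  match pvGetSL p with
  | some s => decide (ph.2.2.1 ≤ s ∧ s ≤ ph.2.2.2)
  | none => false

-- the key of A's min(): abs(p["seconds_left"] - target)  (getD 0 is unreachable inside in_phase)
def pvKey (t : Int) (p : List (String × Int)) : Int := |((pvGetSL p).getD 0) - t|

def select_phase_predictions (predictions_by_ticker : List (String × List (List (String × Int)))) : List (String × String × (List (String × Int))) :=
  predictions_by_ticker.foldl (fun selected tk =>
    pvPhases.foldl (fun sel ph =>
      let in_phase := tk.2.filter (pvInPh ph)
      match PySem.List.min? in_phase (pvKey ph.2.1) with
      | none => sel                               -- 'if not in_phase: continue'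
      | some best => sel ++ [(tk.1, ph.1, best)]) selected) []

-- ===== PORT B =====
-- the body of B's inner 'for i, ph in enumerate(...)' for one phase slot
def pvStepPhase (p : List (String × Int)) (s : Int) (ph : String × Int × Int × Int)
    (cur : Option (List (String × Int) × Int)) : Option (List (String × Int) × Int) :=
  if ph.2.2.1 ≤ s ∧ s ≤ ph.2.2.2 then
    let d := |s - ph.2.1|
    match cur with
    | none => some (p, d)
    | some (q, dq) => if d < dq then some (p, d) else some (q, dq)
  else cur

def select_phase_predictions_alt (predictions_by_ticker : List (String × List (List (String × Int)))) : List (String × String × (List (String × Int))) :=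
  predictions_by_ticker.foldl (fun selected tk =>
    let bests := tk.2.foldl (fun bs p =>
        match pvGetSL p with
        | none => bs                              -- 'if s is None: continue'
        | some s => List.zipWith (pvStepPhase p s) pvPhases bs)
      (pvPhases.map (fun _ => none))
    (pvPhases.zip bests).foldl (fun sel pb =>
      match pb.2 with
      | none => sel
      | some qd => sel ++ [(tk.1, pb.1.1, qd.1)]) selected) []

-- ===== PRECONDITION & SPEC =====
def Spec_select_phase_predictions (predictions_by_ticker : List (String × List (List (String × Int)))) (out : List (String × String × (List (String × Int)))) : Prop := out = select_phase_predictions_alt predictions_by_ticker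
instance (predictions_by_ticker : List (String × List (List (String × Int)))) (out : List (String × String × (List (String × Int)))) : Decidable (Spec_select_phase_predictions predictions_by_ticker out) := by unfold Spec_select_phase_predictions; infer_instance

-- ===== CLAIM (what is proved, stated in full; the proofs are below) =====
def Claim_equal_select_phase_predictions : Prop := ∀ (predictions_by_ticker : List (String × List (List (String × Int)))), Dom_select_phase_predictions predictions_by_ticker → Spec_select_phase_predictions predictions_by_ticker (select_phase_predictions predictions_by_ticker)

-- ===== LEMMAS AND PROOFS =====

-- B's single-phase accumulator fold (one slot of the state list), for the proofs
def pvGo (ph : String × Int × Int × Int) (preds : List (List (String × Int)))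
    (cur : Option (List (String × Int) × Int)) : Option (List (String × Int) × Int) :=
  preds.foldl (fun c p => match pvGetSL p with | none => c | some s => pvStepPhase p s ph c) cur

-- min?'s foldl with a generalized accumulator
def pvMinGo (key : List (String × Int) → Int) (c : Option (List (String × Int)))
    (xs : List (List (String × Int))) : Option (List (String × Int)) :=
  xs.foldl (fun acc x => match acc with
    | none => some x
    | some m => if key x < key m then some x else some m) c

theorem pvMin?_eq_minGo (xs : List (List (String × Int))) (key : List (String × Int) → Int) :
    PySem.List.min? xs key = pvMinGo key none xs := by
  unfold PySem.List.min? pvMinGo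
  congr 1
  funext acc x
  cases acc with
  | none => rfl
  | some m => by_cases h : key x < key m <;> simp [h]

theorem pvGo_eq_minGo (ph : String × Int × Int × Int) (preds : List (List (String × Int)))
    (c : Option (List (String × Int))) :
    pvGo ph preds (c.map (fun q => (q, pvKey ph.2.1 q)))
      = (pvMinGo (pvKey ph.2.1) c (preds.filter (pvInPh ph))).map (fun q => (q, pvKey ph.2.1 q)) := by
  induction preds generalizing c with
  | nil => rfl
  | cons p rest ih =>
    simp only [pvGo, pvMinGo, List.foldl_cons, List.filter_cons] at ih ⊢
    rcases hs : pvGetSL p with _ | s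
    · have hin : pvInPh ph p = false := by simp [pvInPh, hs]
      simp only [hs, hin, Bool.false_eq_true, if_false]
      exact ih c
    · have hk : pvKey ph.2.1 p = |s - ph.2.1| := by simp [pvKey, hs]
      by_cases hr : ph.2.2.1 ≤ s ∧ s ≤ ph.2.2.2
      · have hin : pvInPh ph p = true := by simp [pvInPh, hs, hr]
        simp only [hs, hin, if_true]
        have hstep : pvStepPhase p s ph (c.map (fun q => (q, pvKey ph.2.1 q)))
            = ((match c with
                | none => some p
                | some m => if pvKey ph.2.1 p < pvKey ph.2.1 m then some p else some m).map
              (fun q => (q, pvKey ph.2.1 q))) := by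
          rcases c with _ | m
          · simp [pvStepPhase, hr, hk]
          · simp only [pvStepPhase, hr, if_true, Option.map_some, hk]
            by_cases hlt : |s - ph.2.1| < pvKey ph.2.1 m
            · simp [hlt, hk]
            · simp [hlt, hk]
        rw [hstep]
        exact ih _
      · have hin : pvInPh ph p = false := by simp [pvInPh, hs, hr]
        simp only [hs, hin, Bool.false_eq_true, if_false]
        have hstep : pvStepPhase p s ph (c.map (fun q => (q, pvKey ph.2.1 q)))
            = c.map (fun q => (q, pvKey ph.2.1 q)) := by simp [pvStepPhase, hr]
        rw [hstep]
        exact ih c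

-- B's state-list fold unzips into three independent single-phase folds
theorem pvFold_state (preds : List (List (String × Int)))
    (a b c : Option (List (String × Int) × Int)) :
    preds.foldl (fun bs p =>
        match pvGetSL p with
        | none => bs
        | some s => List.zipWith (pvStepPhase p s) pvPhases bs) [a, b, c]
      = [pvGo ("early", 600, 360, 900) preds a, pvGo ("mid", 180, 90, 360) preds b,
         pvGo ("final_minute", 30, 0, 90) preds c] := by
  induction preds generalizing a b c with
  | nil => rfl
  | cons p rest ih =>
    simp only [List.foldl_cons]
    rcases hs : pvGetSL p with _ | s
    · simp only [hs]
      rw [ih]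
      simp [pvGo, hs]
    · simp only [hs]
      rw [show List.zipWith (pvStepPhase p s) pvPhases [a, b, c]
          = [pvStepPhase p s ("early", 600, 360, 900) a, pvStepPhase p s ("mid", 180, 90, 360) b,
             pvStepPhase p s ("final_minute", 30, 0, 90) c] from by simp [pvPhases], ih]
      simp [pvGo, hs]

-- per-phase bridge with an empty accumulator
theorem pvGo_none (ph : String × Int × Int × Int) (preds : List (List (String × Int))) :
    pvGo ph preds none
      = (PySem.List.min? (preds.filter (pvInPh ph)) (pvKey ph.2.1)).map (fun q => (q, pvKey ph.2.1 q)) := by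
  have := pvGo_eq_minGo ph preds none
  simpa [pvMin?_eq_minGo] using this

-- the two per-ticker bodies agree, from any already-selected prefix
theorem pvTicker_eq (tk : String × List (List (String × Int)))
    (sel : List (String × String × (List (String × Int)))) :
    pvPhases.foldl (fun sel ph =>
      match PySem.List.min? (tk.2.filter (pvInPh ph)) (pvKey ph.2.1) with
      | none => sel
      | some best => sel ++ [(tk.1, ph.1, best)]) sel
    = ((pvPhases.zip (tk.2.foldl (fun bs p =>
          match pvGetSL p with
          | none => bs
          | some s => List.zipWith (pvStepPhase p s) pvPhases bs)
        (pvPhases.map (fun _ => none)))).foldl (fun sel pb =>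
      match pb.2 with
      | none => sel
      | some qd => sel ++ [(tk.1, pb.1.1, qd.1)]) sel) := by
  rw [show (pvPhases.map (fun _ => none) : List (Option (List (String × Int) × Int)))
      = [none, none, none] from rfl, pvFold_state,
    pvGo_none ("early", 600, 360, 900), pvGo_none ("mid", 180, 90, 360),
    pvGo_none ("final_minute", 30, 0, 90)]
  rcases h0 : PySem.List.min? (tk.2.filter (pvInPh ("early", 600, 360, 900))) (pvKey 600) with _ | b0 <;>
  rcases h1 : PySem.List.min? (tk.2.filter (pvInPh ("mid", 180, 90, 360))) (pvKey 180) with _ | b1 <;>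
  rcases h2 : PySem.List.min? (tk.2.filter (pvInPh ("final_minute", 30, 0, 90))) (pvKey 30) with _ | b2 <;>
    simp [pvPhases, h0, h1, h2]

theorem pvMain (pbt : List (String × List (List (String × Int)))) :
    select_phase_predictions pbt = select_phase_predictions_alt pbt := by
  unfold select_phase_predictions select_phase_predictions_alt
  induction pbt using List.reverseRecOn with
  | nil => rfl
  | append_singleton rest tk ih =>
    rw [List.foldl_append, List.foldl_append, ← ih]
    simp only [List.foldl_cons, List.foldl_nil]
    exact pvTicker_eq tk _

-- ===== VERDICT (by name: the statement is the Claim_ definition above) =====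
theorem select_phase_predictions_spec : Claim_equal_select_phase_predictions := by
  intro pbt _
  exact pvMain pbt
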